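-- pv_equiv track=rewrite | github.com/eugene-okulik/st6 | homework/oksana_gavrush/homework_17/analyzer.py | find_text_with_context_by_line
-- ===== SOURCE A (Python) =====
-- def find_text_with_context_by_line(text, word, before_context_size=100, after_context_size=100):
--     results = {}
--     lines = text.split('\n')
--     word_len = len(word)
--
--     for i, line in enumerate(lines, start=1):
--         for j in range(len(line)):
--             if line[j:j + word_len] == word:
--                 start_index = max(0, j - before_context_size)
--                 context_before = line[start_index:j]
--
--                 context_after = ''
--                 remaining_length = after_context_size
--                 line_index = i - 1
--                 offset = j + word_len
--
--                 while remaining_length > 0 and line_index < len(lines):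
--                     start_point = offset if line_index == i - 1 else 0
--                     end_point = min(len(lines[line_index]), start_point + remaining_length)
--
--                     context_after += lines[line_index][start_point:end_point]
--
--                     remaining_length -= end_point - start_point
--                     line_index += 1
--                     offset = 0
--
--                 context = context_before + word + context_after
--                 results[i] = context.strip()
--                 break
--
--     return results
-- ===== SOURCE B (Python) =====
-- def find_text_with_context_by_line(text, word, before_context_size=100, after_context_size=100):
--     results = {}
--     lines = text.split('\n')
--     for i, line in enumerate(lines, start=1):
--         if not line:
--             continue
--         j = line.find(word)
--         if j == -1:
--             continue
--         before = line[max(0, j - before_context_size):j]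
--         tail = line[j + len(word):] + ''.join(lines[i:])
--         after = tail[:after_context_size] if after_context_size > 0 else ''
--         results[i] = (before + word + after).strip()
--     return results
-- ===== Notes on version B (the rewrite author's own statement) =====
-- stated objective: simpler
-- what changed: B replaces A's per-character slice-and-compare scan by line.find(word) (guarded so an empty line yields no match) and replaces A's line-walking while loop for the after-context by joining the following text once and taking a single slice of it.
import Mathlib
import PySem

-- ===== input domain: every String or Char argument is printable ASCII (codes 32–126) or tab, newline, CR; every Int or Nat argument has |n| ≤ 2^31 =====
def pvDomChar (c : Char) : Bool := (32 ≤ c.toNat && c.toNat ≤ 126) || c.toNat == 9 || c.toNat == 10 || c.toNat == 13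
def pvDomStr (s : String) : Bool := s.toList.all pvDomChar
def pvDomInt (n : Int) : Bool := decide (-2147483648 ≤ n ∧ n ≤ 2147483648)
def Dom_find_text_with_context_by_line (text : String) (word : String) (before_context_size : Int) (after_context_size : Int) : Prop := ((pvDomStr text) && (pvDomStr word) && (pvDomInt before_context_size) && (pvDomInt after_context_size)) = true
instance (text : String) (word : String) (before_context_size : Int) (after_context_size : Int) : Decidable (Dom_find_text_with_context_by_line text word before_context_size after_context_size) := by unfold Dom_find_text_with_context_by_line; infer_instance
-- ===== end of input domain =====

-- B replaces A's character-by-character first-match scan by line.find and A's line-walking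
-- while loop for the after-context by one join-then-slice of the following text (objective: simpler).

-- ===== PORT A =====
-- 'for j in range(len(line)): if line[j:j+word_len] == word: … break' — first matching j
def pvScanA (word : List Char) (line : List Char) (j : Nat) : Option Nat :=
  if h : j < line.length then
    if PySem.List.slice line (some (j : Int)) (some ((j : Int) + word.length)) = word then some j
    else pvScanA word line (j + 1)
  else none
termination_by line.length - j

-- A's while loop: 'while remaining_length > 0 and line_index < len(lines): …'
def pvWhileA (lines : List (List Char)) (i1 : Nat) (ctx : List Char) (rem : Int) (li : Nat) (off : Nat) : List Char :=
  if h : 0 < rem ∧ li < lines.length then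
    let ln := lines.getD li []
    let sp : Nat := if li = i1 then off else 0
    let ep : Int := min (ln.length : Int) ((sp : Int) + rem)
    pvWhileA lines i1 (ctx ++ PySem.List.slice ln (some (sp : Int)) (some ep)) (rem - (ep - sp)) (li + 1) 0
  else ctx
termination_by lines.length - li
decreasing_by omega

-- the body of A's per-line loop (None = no occurrence in this line)
def pvEntryA (lines : List (List Char)) (word : List Char) (before after : Int) (i : Nat) (line : List Char) : Option (List Char) :=
  match pvScanA word line 0 with
  | none => none
  | some j =>
      some (PySem.Chars.strip
        (PySem.List.slice line (some (max 0 ((j : Int) - before))) (some (j : Int))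
          ++ word
          ++ pvWhileA lines (i - 1) [] after (i - 1) (j + word.length)))

-- 'for i, line in enumerate(lines, start=1): …' with 'results[i] = …' (fresh increasing keys)
def pvMainA (lines : List (List Char)) (word : List Char) (before after : Int) (i : Nat) (rest : List (List Char)) (acc : List (Int × String)) : List (Int × String) :=
  match rest with
  | [] => acc
  | line :: t =>
      pvMainA lines word before after (i + 1) t
        (match pvEntryA lines word before after i line with
         | none => acc
         | some v => acc ++ [((i : Int), String.ofList v)])

def find_text_with_context_by_line (text : String) (word : String) (before_context_size : Int) (after_context_size : Int) : List (Int × String) :=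
  let lines := PySem.Chars.splitOn text.toList ['\n']
  pvMainA lines word.toList before_context_size after_context_size 1 lines []

-- ===== PORT B =====
-- B's per-line body: j = line.find(word); before + word + (line[j+len(word):] + ''.join(lines[i:]))[:after]
def pvEntryB (lines : List (List Char)) (word : List Char) (before after : Int) (i : Nat) (line : List Char) : Option (List Char) :=
  if line = [] then none
  else
    let f := PySem.Chars.find line word
    if f = -1 then none
    else
      let j := f.toNat
      let bef := PySem.List.slice line (some (max 0 ((j : Int) - before))) (some (j : Int))
      let tail := PySem.List.slice line (some ((j : Int) + word.length)) none
                    ++ PySem.Chars.join [] (PySem.List.slice lines (some (i : Int)) none)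
      let aft := if 0 < after then PySem.List.slice tail none (some after) else []
      some (PySem.Chars.strip (bef ++ word ++ aft))

def pvMainB (lines : List (List Char)) (word : List Char) (before after : Int) (i : Nat) (rest : List (List Char)) (acc : List (Int × String)) : List (Int × String) :=
  match rest with
  | [] => acc
  | line :: t =>
      pvMainB lines word before after (i + 1) t
        (match pvEntryB lines word before after i line with
         | none => acc
         | some v => acc ++ [((i : Int), String.ofList v)])

def find_text_with_context_by_line_alt (text : String) (word : String) (before_context_size : Int) (after_context_size : Int) : List (Int × String) :=
  let lines := PySem.Chars.splitOn text.toList ['\n']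
  pvMainB lines word.toList before_context_size after_context_size 1 lines []

-- ===== PRECONDITION & SPEC =====
def Spec_find_text_with_context_by_line (text : String) (word : String) (before_context_size : Int) (after_context_size : Int) (out : List (Int × String)) : Prop := out = find_text_with_context_by_line_alt text word before_context_size after_context_size
instance (text : String) (word : String) (before_context_size : Int) (after_context_size : Int) (out : List (Int × String)) : Decidable (Spec_find_text_with_context_by_line text word before_context_size after_context_size out) := by unfold Spec_find_text_with_context_by_line; infer_instance

-- ===== CLAIM (what is proved, stated in full; the proofs are below) =====
def Claim_equal_find_text_with_context_by_line : Prop := ∀ (text : String) (word : String) (before_context_size : Int) (after_context_size : Int), Dom_find_text_with_context_by_line text word before_context_size after_context_size → Spec_find_text_with_context_by_line text word before_context_size after_context_size (find_text_with_context_by_line text word before_context_size after_context_size)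

-- ===== LEMMAS AND PROOFS =====

-- ''.join(parts) is flatten
lemma pv_join_flatten (ls : List (List Char)) : PySem.Chars.join [] ls = ls.flatten := by
  match ls with
  | [] => simp [PySem.Chars.join_nil]
  | [a] => simp [PySem.Chars.join_singleton]
  | a :: b :: t =>
      rw [PySem.Chars.join_cons_cons]
      simp [pv_join_flatten (b :: t)]

-- one budgeted take across an append
lemma pv_take_budget (a b : List Char) (rem : Int) (h : 0 < rem) :
    a.take (min a.length rem.toNat)
      ++ (if 0 < rem - min (a.length : Int) rem then b.take (rem - min (a.length : Int) rem).toNat else [])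
      = (a ++ b).take rem.toNat := by
  rw [List.take_append]
  rcases le_or_gt rem (a.length : Int) with h1 | h1
  · have e1 : min a.length rem.toNat = rem.toNat := by omega
    have e2 : min (a.length : Int) rem = rem := by omega
    have e3 : rem.toNat - a.length = 0 := by omega
    simp [e1, e2, e3]
  · have e1 : min a.length rem.toNat = a.length := by omega
    have e2 : min (a.length : Int) rem = (a.length : Int) := by omega
    have e3 : (rem - (a.length : Int)).toNat = rem.toNat - a.length := by omega
    rw [e1, e2, List.take_length]
    rw [if_pos (by omega), e3]
    rw [List.take_of_length_le (l := a) (by omega)]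

-- the continuation of A's while loop (offset already 0) takes from the flatten of the remaining lines
lemma pv_whileA_zero (lines : List (List Char)) (i1 : Nat) :
    ∀ n li ctx rem, lines.length ≤ li + n →
      pvWhileA lines i1 ctx rem li 0
        = ctx ++ (if 0 < rem then ((lines.drop li).flatten).take rem.toNat else []) := by
  intro n
  induction n with
  | zero =>
      intro li ctx rem hle
      rw [pvWhileA, dif_neg (by omega)]
      rw [List.drop_eq_nil_of_le (by omega)]
      simp
  | succ n ih =>
      intro li ctx rem hle
      by_cases hg : 0 < rem ∧ li < lines.length
      · rw [pvWhileA, dif_pos hg]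
        simp only [ite_self, Nat.cast_zero, zero_add, sub_zero]
        have hep : min ((lines.getD li []).length : Int) rem
            = (((min ((lines.getD li []).length : Int) rem).toNat : Nat) : Int) := by omega
        have hs := PySem.List.slice_natCast (lines.getD li []) 0
          ((min ((lines.getD li []).length : Int) rem).toNat)
        simp only [Nat.cast_zero, Nat.sub_zero, List.drop_zero] at hs
        rw [hep, hs]
        rw [ih (li + 1) _ _ (by omega)]
        rw [List.drop_eq_getElem_cons hg.2, List.flatten_cons, List.append_assoc]
        congr 1
        rw [← List.getD_eq_getElem lines [] hg.2]
        have e2 : rem - ((min (((lines.getD li []).length : Int)) rem).toNat : Int)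
            = rem - min (((lines.getD li []).length : Int)) rem := by omega
        have e1 : (min (((lines.getD li []).length : Int)) rem).toNat
            = min (lines.getD li []).length rem.toNat := by omega
        rw [e2, e1, pv_take_budget _ _ _ hg.1, if_pos hg.1]
      · rw [pvWhileA, dif_neg hg]
        rcases not_and_or.mp hg with hr | hl
        · rw [if_neg hr]; simp
        · rw [List.drop_eq_nil_of_le (by omega)]; simp

-- A's while loop from the match line onward is one budgeted take
lemma pv_whileA_start (lines : List (List Char)) (i1 off : Nat) (rem : Int)
    (hi : i1 < lines.length) (hoff : off ≤ (lines.getD i1 []).length) :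
    pvWhileA lines i1 [] rem i1 off
      = (if 0 < rem then (((lines.getD i1 []).drop off) ++ ((lines.drop (i1 + 1)).flatten)).take rem.toNat else []) := by
  by_cases hr : 0 < rem
  · rw [pvWhileA, dif_pos ⟨hr, hi⟩]
    simp only [if_true]
    have hep : min (((lines.getD i1 []).length : Int)) ((off : Int) + rem)
        = (((min (((lines.getD i1 []).length : Int)) ((off : Int) + rem)).toNat : Nat) : Int) := by omega
    have hs := PySem.List.slice_natCast (lines.getD i1 []) off
      ((min (((lines.getD i1 []).length : Int)) ((off : Int) + rem)).toNat)
    rw [hep, hs]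
    rw [pv_whileA_zero lines i1 lines.length (i1 + 1) _ _ (by omega)]
    have e1 : (min (((lines.getD i1 []).length : Int)) ((off : Int) + rem)).toNat - off
        = min ((lines.getD i1 []).drop off).length rem.toNat := by
      rw [List.length_drop]; omega
    have e2 : rem - (((min (((lines.getD i1 []).length : Int)) ((off : Int) + rem)).toNat : Int) - (off : Int))
        = rem - min (((lines.getD i1 []).drop off).length : Int) rem := by
      rw [List.length_drop]; omega
    rw [List.nil_append, e1, e2, pv_take_budget _ _ _ hr, if_pos hr]
  · rw [pvWhileA, dif_neg (fun hh => hr hh.1), if_neg hr]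

-- A's slice test at j is 'word is a prefix of line.drop j'
lemma pv_scan_test (word line : List Char) (j : Nat) :
    (PySem.List.slice line (some (j : Int)) (some ((j : Int) + word.length)) = word)
      ↔ word <+: line.drop j := by
  have hs := PySem.List.slice_natCast line j (j + word.length)
  push_cast at hs
  rw [hs, Nat.add_sub_cancel_left]
  constructor
  · intro he
    exact List.prefix_iff_eq_take.mpr he.symm
  · intro hp
    exact (List.prefix_iff_eq_take.mp hp).symm

-- the scan finds nothing when word occurs nowhere
lemma pv_scan_none (word line : List Char) (hno : ∀ k, ¬ word <+: line.drop k) :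
    ∀ n j, line.length ≤ j + n → pvScanA word line j = none := by
  intro n
  induction n with
  | zero => intro j hle; rw [pvScanA, dif_neg (by omega)]
  | succ n ih =>
      intro j hle
      rw [pvScanA]
      by_cases hj : j < line.length
      · rw [dif_pos hj, if_neg (fun he => hno j ((pv_scan_test word line j).mp he))]
        exact ih (j + 1) (by omega)
      · rw [dif_neg hj]

-- the scan from j ≤ k returns the first occurrence k
lemma pv_scan_some (word line : List Char) (k : Nat) (hk : k < line.length)
    (h1 : word <+: line.drop k) (h2 : ∀ m < k, ¬ word <+: line.drop m) :
    ∀ n j, j ≤ k → k ≤ j + n → pvScanA word line j = some k := by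
  intro n
  induction n with
  | zero =>
      intro j hjk hkj
      have hj : j = k := by omega
      subst hj
      rw [pvScanA, dif_pos hk, if_pos ((pv_scan_test word line j).mpr h1)]
  | succ n ih =>
      intro j hjk hkj
      by_cases hj : j = k
      · subst hj
        rw [pvScanA, dif_pos hk, if_pos ((pv_scan_test word line j).mpr h1)]
      · rw [pvScanA, dif_pos (by omega),
          if_neg (fun he => h2 j (by omega) ((pv_scan_test word line j).mp he))]
        exact ih (j + 1) (by omega) (by omega)

-- A's scan computes line.find(word) (with the empty-line corner)
lemma pv_scan_eq (word line : List Char) :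
    pvScanA word line 0
      = if line = [] then none
        else if PySem.Chars.find line word = -1 then none
        else some (PySem.Chars.find line word).toNat := by
  by_cases hnil : line = []
  · subst hnil
    rw [pvScanA, dif_neg (by simp), if_pos rfl]
  · rw [if_neg hnil]
    by_cases hf : PySem.Chars.find line word = -1
    · rw [if_pos hf]
      have hninf : ¬ word <:+: line := (PySem.Chars.find_eq_neg_one_iff line word).mp hf
      have hno : ∀ k, ¬ word <+: line.drop k := by
        intro k hkp
        exact hninf ((PySem.Chars.isIn_iff_infix word line).mp
          ((PySem.Chars.exists_prefix_drop_iff_isIn word line).mp ⟨k, hkp⟩))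
      exact pv_scan_none word line hno line.length 0 (by omega)
    · rw [if_neg hf]
      have hf0 : 0 ≤ PySem.Chars.find line word := by
        have := PySem.Chars.neg_one_le_find line word; omega
      obtain ⟨h1, h2⟩ := PySem.Chars.find_spec hf0
      have hk : (PySem.Chars.find line word).toNat < line.length := by
        rcases eq_or_ne word [] with hw | hw
        · subst hw
          rw [PySem.Chars.find_nil] at *
          simpa using List.length_pos_of_ne_nil hnil
        · have hlen := h1.length_le
          rw [List.length_drop] at hlen
          have hw1 : 0 < word.length := List.length_pos_of_ne_nil hw
          have hle := PySem.Chars.find_le_length line word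
          omega
      exact pv_scan_some word line _ hk h1 h2 line.length 0 (by omega) (by omega)

-- per-line bodies agree
lemma pv_entry_eq (lines : List (List Char)) (word : List Char) (before after : Int)
    (i : Nat) (line : List Char) (t : List (List Char)) (h1 : 1 ≤ i)
    (hd : lines.drop (i - 1) = line :: t) :
    pvEntryA lines word before after i line = pvEntryB lines word before after i line := by
  have hlt : i - 1 < lines.length := by
    by_contra h
    rw [List.drop_eq_nil_of_le (by omega)] at hd
    simp at hd
  have hcons := List.drop_eq_getElem_cons hlt
  rw [hd] at hcons
  have hget : lines.getD (i - 1) [] = line := by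
    rw [List.getD_eq_getElem lines [] hlt]
    exact (List.cons.injEq .. ▸ hcons).1.symm
  have hi1 : i - 1 + 1 = i := by omega
  have ht : lines.drop i = t := by
    rw [← hi1]
    exact ((List.cons.injEq .. ▸ hcons).2).symm
  simp only [pvEntryA, pvEntryB]
  rw [pv_scan_eq]
  by_cases hnil : line = []
  · simp [hnil]
  · by_cases hf : PySem.Chars.find line word = -1
    · simp [hnil, hf]
    · simp only [if_neg hnil, if_neg hf]
      have hf0 : 0 ≤ PySem.Chars.find line word := by
        have := PySem.Chars.neg_one_le_find line word; omega
      obtain ⟨hp, -⟩ := PySem.Chars.find_spec hf0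
      have hoff : (PySem.Chars.find line word).toNat + word.length ≤ line.length := by
        have hlen := hp.length_le
        rw [List.length_drop] at hlen
        have := PySem.Chars.find_le_length line word
        omega
      congr 2
      rw [pv_whileA_start lines (i - 1) _ after hlt (by rw [hget]; exact hoff)]
      rw [hget, hi1, ht]
      have hs1 := PySem.List.slice_from line
        (a := ((PySem.Chars.find line word).toNat : Int) + (word.length : Int)) (by positivity)
      have e1 : ((((PySem.Chars.find line word).toNat : Int) + (word.length : Int))).toNat
          = (PySem.Chars.find line word).toNat + word.length := by omega
      rw [hs1, e1]
      have hs2 := PySem.List.slice_from lines (a := (i : Int)) (by positivity)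
      have e2 : ((i : Int)).toNat = i := by omega
      rw [hs2, e2, ht, pv_join_flatten]
      by_cases ha : 0 < after
      · rw [if_pos ha, if_pos ha, PySem.List.slice_to _ (by omega)]
      · rw [if_neg ha, if_neg ha]

-- the outer loops agree
lemma pv_main_eq (lines : List (List Char)) (word : List Char) (before after : Int) :
    ∀ (rest : List (List Char)) (i : Nat) (acc : List (Int × String)), 1 ≤ i →
      lines.drop (i - 1) = rest →
      pvMainA lines word before after i rest acc = pvMainB lines word before after i rest acc := by
  intro rest
  induction rest with
  | nil => intro i acc _ _; rw [pvMainA, pvMainB]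
  | cons line t ih =>
      intro i acc h1 hd
      rw [pvMainA, pvMainB]
      rw [pv_entry_eq lines word before after i line t h1 hd]
      apply ih (i + 1) _ (by omega)
      have hi1 : i - 1 + 1 = i := by omega
      have hdt : lines.drop i = t := by
        rw [← hi1, ← List.tail_drop, hd, List.tail_cons]
      simpa using hdt

-- ===== VERDICT (by name: the statement is the Claim_ definition above) =====
theorem find_text_with_context_by_line_spec : Claim_equal_find_text_with_context_by_line := by
  intro text word before after _
  unfold Spec_find_text_with_context_by_line
  unfold find_text_with_context_by_line find_text_with_context_by_line_alt
  exact pv_main_eq _ _ _ _ _ 1 [] le_rfl (by simp)
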